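-- pv_equiv track=rewrite | github.com/marth00165/DigitalDefenseIncCC | question2Attempt1.py | port_reducer
-- ===== SOURCE A (Python) =====
-- def port_reducer(include_range, exclude_range):
--     safe_ports = [port for port in include_range if port not in exclude_range]
--     outlist = []
--     cleared_ports = []
--     templist = [safe_ports.pop(0)]
--     while len(safe_ports) > 0:
--         x = safe_ports.pop(0)
--         if x - templist[-1] > 1:
--             outlist.append(templist)
--             templist = [x]
--         else:
--             templist.append(x)
--     outlist.append(templist)
--
--     for port_list in outlist:
--         cleared_ports.append([port_list[0], port_list[-1]])
--
--     return cleared_ports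
-- ===== SOURCE B (Python) =====
-- def port_reducer(include_range, exclude_range):
--     banned = set(exclude_range)
--     safe_ports = [p for p in include_range if p not in banned]
--     start = prev = safe_ports[0]
--     result = []
--     for p in safe_ports[1:]:
--         if p - prev > 1:
--             result.append([start, prev])
--             start = p
--         prev = p
--     result.append([start, prev])
--     return result
-- ===== Notes on version B (the rewrite author's own statement) =====
-- stated objective: faster
-- what changed: B fuses A's group-building and endpoint-extraction passes into one pass keeping only two scalars (start, prev) per run instead of a list-of-lists plus a mapping pass, tests exclusion against a set built once, and avoids quadratic list.pop(0).
import Mathlib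
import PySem

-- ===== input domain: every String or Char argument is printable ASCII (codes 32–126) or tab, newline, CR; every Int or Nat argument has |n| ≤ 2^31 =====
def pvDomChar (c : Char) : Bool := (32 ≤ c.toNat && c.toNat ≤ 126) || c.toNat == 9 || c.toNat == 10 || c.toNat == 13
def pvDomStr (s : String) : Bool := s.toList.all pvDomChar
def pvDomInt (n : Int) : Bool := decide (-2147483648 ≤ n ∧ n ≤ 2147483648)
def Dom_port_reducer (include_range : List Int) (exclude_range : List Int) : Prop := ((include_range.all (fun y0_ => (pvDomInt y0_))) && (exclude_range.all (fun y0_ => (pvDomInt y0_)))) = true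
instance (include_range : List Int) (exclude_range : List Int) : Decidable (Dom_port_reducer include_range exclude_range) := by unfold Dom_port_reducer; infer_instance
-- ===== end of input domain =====

-- B fuses A's two passes (group into lists, then map to endpoints) into one pass keeping only
-- two scalars per run, with set membership and no list.pop(0); objective: faster. Both raise IndexError when no port survives filtering
-- (excluded by Pre_).

-- ===== PORT A =====
-- the while loop: pops x from safe, compares with templist[-1]
def portA_loop (safe : List Int) (templist : List Int) (outlist : List (List Int)) : List (List Int) :=
  match safe with
  | [] => outlist ++ [templist]
  | x :: rest =>
      if x - (templist.getLast?.getD 0) > 1 then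
        portA_loop rest [x] (outlist ++ [templist])
      else
        portA_loop rest (templist ++ [x]) outlist

def port_reducer (include_range : List Int) (exclude_range : List Int) : List (List Int) :=
  match include_range.filter (fun port => !(exclude_range.contains port)) with  -- safe_ports
  | [] => []  -- safe_ports.pop(0) raises IndexError in Python: outside Pre_
  | t :: rest =>
      (portA_loop rest [t] []).map (fun port_list => [port_list.headD 0, port_list.getLast?.getD 0])

-- ===== PORT B =====
-- the single pass: start/prev scalars, appending [start, prev] at each break and at the end
def portB_loop (safe : List Int) (start : Int) (prev : Int) (result : List (List Int)) : List (List Int) :=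
  match safe with
  | [] => result ++ [[start, prev]]
  | p :: rest =>
      if p - prev > 1 then portB_loop rest p p (result ++ [[start, prev]])
      else portB_loop rest start p result

def port_reducer_alt (include_range : List Int) (exclude_range : List Int) : List (List Int) :=
  match include_range.filter (fun p => !(PySem.Set.contains (PySem.Set.ofList exclude_range) p)) with  -- banned = set(exclude_range)
  | [] => []  -- safe_ports[0] raises IndexError in Python: outside Pre_
  | h :: rest => portB_loop rest h h []

-- ===== PRECONDITION & SPEC =====
-- Pre_ excludes exactly the inputs where safe_ports is empty: there both A and B raise IndexError.
def Pre_port_reducer (include_range : List Int) (exclude_range : List Int) : Prop :=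
  include_range.any (fun p => !(exclude_range.contains p)) = true
instance (include_range : List Int) (exclude_range : List Int) : Decidable (Pre_port_reducer include_range exclude_range) := by unfold Pre_port_reducer; infer_instance
def pvWitness_port_reducer : List Int × List Int := ([1, 2, 5, 6, 9], [5])

def Spec_port_reducer (include_range : List Int) (exclude_range : List Int) (out : List (List Int)) : Prop := out = port_reducer_alt include_range exclude_range
instance (include_range : List Int) (exclude_range : List Int) (out : List (List Int)) : Decidable (Spec_port_reducer include_range exclude_range out) := by unfold Spec_port_reducer; infer_instance

-- ===== CLAIM (what is proved, stated in full; the proofs are below) =====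
def Claim_equal_port_reducer : Prop := ∀ (include_range : List Int) (exclude_range : List Int), Dom_port_reducer include_range exclude_range → Pre_port_reducer include_range exclude_range → Spec_port_reducer include_range exclude_range (port_reducer include_range exclude_range)

-- ===== LEMMAS AND PROOFS =====

def pvF (pl : List Int) : List Int := [pl.headD 0, pl.getLast?.getD 0]

theorem portA_loop_eq (safe : List Int) :
    ∀ (templist : List Int) (outlist : List (List Int)), templist ≠ [] →
    (portA_loop safe templist outlist).map pvF
      = portB_loop safe (templist.headD 0) (templist.getLast?.getD 0) (outlist.map pvF) := by
  induction safe with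
  | nil =>
      intro templist outlist _
      simp [portA_loop, portB_loop, pvF]
  | cons x rest ih =>
      intro templist outlist h
      simp only [portA_loop, portB_loop]
      split_ifs with hc
      · rw [ih [x] (outlist ++ [templist]) (by simp)]
        simp [pvF]
      · rw [ih (templist ++ [x]) outlist (by simp)]
        congr 1
        · cases templist with
          | nil => exact absurd rfl h
          | cons a l => simp
        · simp

theorem mem_set_ofList_contains (exclude_range : List Int) (p : Int) :
    PySem.Set.contains (PySem.Set.ofList exclude_range) p = exclude_range.contains p := by
  by_cases h : p ∈ exclude_range
  · simp [PySem.Set.contains_eq_listContains, PySem.Set.mem_ofList, h]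
  · simp [PySem.Set.contains_eq_listContains, PySem.Set.mem_ofList, h]

-- ===== VERDICT (by name: the statement is the Claim_ definition above) =====
theorem port_reducer_spec : Claim_equal_port_reducer := by
  intro include_range exclude_range _ hpre
  unfold Spec_port_reducer port_reducer port_reducer_alt
  have hfilt : include_range.filter (fun p => !(PySem.Set.contains (PySem.Set.ofList exclude_range) p))
      = include_range.filter (fun port => !(exclude_range.contains port)) := by
    apply List.filter_congr
    intro x _
    rw [mem_set_ofList_contains]
  rw [hfilt]
  rw [Pre_port_reducer, List.any_eq_true] at hpre
  obtain ⟨p, hp, hnp'⟩ := hpre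
  have hnp : p ∉ exclude_range := by simpa using hnp'
  cases hcase : include_range.filter (fun port => !(exclude_range.contains port)) with
  | nil =>
      exfalso
      have hmem : p ∈ include_range.filter (fun port => !(exclude_range.contains port)) := by
        simp [List.mem_filter, hp, hnp]
      rw [hcase] at hmem
      simp at hmem
  | cons t rest =>
      show List.map pvF (portA_loop rest [t] []) = portB_loop rest t t []
      exact portA_loop_eq rest [t] [] (List.cons_ne_nil t [])
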